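-- pv_equiv track=rewrite | github.com/thirupathireddy665/crossbeam | src/bustle_generated_properties.py | is_large
-- ===== SOURCE A (Python) =====
-- AllTrue = -1
--
-- Mixed = 0
--
-- AllFalse = 1
--
-- def is_large(inputs):
--     is_true_present = False
--     is_false_present = False
--     for program_input in inputs:
--         if program_input > 9:
--             is_true_present = True
--         else:
--             is_false_present = True
--
--     if is_true_present and is_false_present:
--         return Mixed
--     elif is_true_present:
--         return AllTrue
--     else:
--         return AllFalse
-- ===== SOURCE B (Python) =====
-- AllTrue = -1
--
-- Mixed = 0
--
-- AllFalse = 1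
--
-- def is_large(inputs):
--     xs = list(inputs)
--     if not xs:
--         return AllFalse
--     if min(xs) > 9:
--         return AllTrue
--     if max(xs) > 9:
--         return Mixed
--     return AllFalse
-- ===== Notes on version B (the rewrite author's own statement) =====
-- stated objective: alternative
-- what changed: Instead of scanning with two presence flags, B reduces the list to its extremes and classifies by comparing only min and max against 9: min>9 means AllTrue, else max>9 means Mixed, else AllFalse (empty list short-circuits to AllFalse).
import Mathlib
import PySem

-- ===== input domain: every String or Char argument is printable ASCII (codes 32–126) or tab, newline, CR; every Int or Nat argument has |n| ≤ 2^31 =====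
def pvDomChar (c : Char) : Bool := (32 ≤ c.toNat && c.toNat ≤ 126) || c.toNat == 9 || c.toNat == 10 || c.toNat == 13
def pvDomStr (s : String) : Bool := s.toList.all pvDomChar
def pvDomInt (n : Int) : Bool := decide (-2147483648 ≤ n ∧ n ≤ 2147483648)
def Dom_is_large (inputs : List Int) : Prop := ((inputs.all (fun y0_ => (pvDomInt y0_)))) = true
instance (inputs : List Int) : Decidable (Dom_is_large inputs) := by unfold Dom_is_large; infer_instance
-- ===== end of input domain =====

-- B classifies by the list's extremes (min/max compared to 9) instead of A's
-- flag-setting scan (objective: alternative); same O(n) cost.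

-- ===== PORT A =====
def is_large (inputs : List Int) : Int :=
  let st := inputs.foldl
    (fun (st : Bool × Bool) program_input =>
      if program_input > 9 then (true, st.2) else (st.1, true))
    (false, false)
  if st.1 && st.2 then 0
  else if st.1 then -1
  else 1

-- ===== PORT B =====
def is_large_alt (inputs : List Int) : Int :=
  match PySem.List.min? inputs (fun x => x), PySem.List.max? inputs (fun x => x) with
  | some m, some mx => if m > 9 then -1 else if mx > 9 then 0 else 1
  | _, _ => 1

-- ===== PRECONDITION & SPEC =====
def Spec_is_large (inputs : List Int) (out : Int) : Prop := out = is_large_alt inputs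
instance (inputs : List Int) (out : Int) : Decidable (Spec_is_large inputs out) := by unfold Spec_is_large; infer_instance

-- ===== CLAIM =====
def Claim_equal_is_large : Prop := ∀ (inputs : List Int), Dom_is_large inputs → Spec_is_large inputs (is_large inputs)

-- ===== LEMMAS AND PROOFS =====

-- A's loop with generalized accumulator: flags are "some element > 9" / "some element ≤ 9".
theorem is_large_loop (xs : List Int) (t f : Bool) :
    xs.foldl (fun (st : Bool × Bool) x => if x > 9 then (true, st.2) else (st.1, true)) (t, f)
      = (t || xs.any (fun x => decide (x > 9)), f || xs.any (fun x => !decide (x > 9))) := by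
  induction xs generalizing t f with
  | nil => simp
  | cons a xs ih =>
    by_cases h : a > 9 <;> simp [List.any_cons, h, ih]

-- ===== VERDICT =====
theorem is_large_spec : Claim_equal_is_large := by
  intro inputs _
  unfold Spec_is_large is_large is_large_alt
  have hloop := is_large_loop inputs false false
  simp only [Bool.false_or] at hloop
  simp only [hloop]
  cases hm : PySem.List.min? inputs (fun x => x) with
  | none =>
    have : inputs = [] := (PySem.List.min?_eq_none_iff _ _).mp hm
    subst this
    simp
  | some m =>
    have hmem := PySem.List.min?_mem hm
    have hmin := PySem.List.min?_isMin hm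
    have hne : inputs ≠ [] := by rintro rfl; simp at hmem
    cases hx : PySem.List.max? inputs (fun x => x) with
    | none => exact absurd ((PySem.List.max?_eq_none_iff _ _).mp hx) hne
    | some mx =>
      have hxmem := PySem.List.max?_mem hx
      have hmax := PySem.List.max?_isMax hx
      by_cases h1 : m > 9
      · -- all elements > 9
        have hT : inputs.any (fun x => decide (x > 9)) = true :=
          List.any_eq_true.mpr ⟨m, hmem, by simpa using h1⟩
        have hF : inputs.any (fun x => !decide (x > 9)) = false := by
          simp only [List.any_eq_false]
          intro x hxi
          simp only [Bool.not_eq_true', decide_eq_false_iff_not, not_not]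
          exact lt_of_lt_of_le h1 (hmin x hxi)
        simp [hT, hF, h1]
      · -- min ≤ 9, so "false present"
        have hF : inputs.any (fun x => !decide (x > 9)) = true := by
          refine List.any_eq_true.mpr ⟨m, hmem, ?_⟩
          simpa using h1
        by_cases h2 : mx > 9
        · have hT : inputs.any (fun x => decide (x > 9)) = true :=
            List.any_eq_true.mpr ⟨mx, hxmem, by simpa using h2⟩
          simp [hT, hF, h1, h2]
        · have hT : inputs.any (fun x => decide (x > 9)) = false := by
            simp only [List.any_eq_false]
            intro x hxi
            have : x ≤ 9 := le_trans (hmax x hxi) (not_lt.mp h2)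
            simpa using not_lt.mpr this
          simp [hT, hF, h1, h2]
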